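-- pv_equiv track=rewrite | github.com/2Shannon0/hse_algorithms_and_data_structures_spring_2024 | 07/index.py | calculate_line_and_word_numbers
-- ===== SOURCE A (Python) =====
-- def calculate_line_and_word_numbers(txt, s):
--     line_number = 1
--     word_number = 1
--
--     # необходимо для кореектной обработки двойного пробела
--     in_word = False
--
--     for i in range(s):
--         if txt[i] == "\n":
--             line_number += 1
--             word_number = 1
--             in_word = False
--         elif txt[i] == " ":
--             if in_word:
--                 word_number += 1
--             in_word = False
--         else:
--             in_word = True
--
--     return line_number, word_number
-- ===== SOURCE B (Python) =====
-- def calculate_line_and_word_numbers(txt, s):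
--     if s <= 0:
--         return 1, 1
--     prefix = txt[:s]
--     line_number = 1 + prefix.count('\n')
--     seg = []
--     for c in prefix:
--         if c == '\n':
--             seg.clear()
--         else:
--             seg.append(c)
--     word_number = 1 + sum(1 for a, b in zip(seg, seg[1:]) if a != ' ' and b == ' ')
--     return line_number, word_number
-- ===== Notes on version B (the rewrite author's own statement) =====
-- stated objective: alternative
-- what changed: Replaces A's single three-register state machine (line counter, word counter, in_word flag updated per indexed character) by a decomposition over the sliced prefix txt[:s]: line number from str.count('\n'), the current line rebuilt by reset-on-newline, and the word number as 1 plus the count of word-end adjacent pairs via zip.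
import Mathlib
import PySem

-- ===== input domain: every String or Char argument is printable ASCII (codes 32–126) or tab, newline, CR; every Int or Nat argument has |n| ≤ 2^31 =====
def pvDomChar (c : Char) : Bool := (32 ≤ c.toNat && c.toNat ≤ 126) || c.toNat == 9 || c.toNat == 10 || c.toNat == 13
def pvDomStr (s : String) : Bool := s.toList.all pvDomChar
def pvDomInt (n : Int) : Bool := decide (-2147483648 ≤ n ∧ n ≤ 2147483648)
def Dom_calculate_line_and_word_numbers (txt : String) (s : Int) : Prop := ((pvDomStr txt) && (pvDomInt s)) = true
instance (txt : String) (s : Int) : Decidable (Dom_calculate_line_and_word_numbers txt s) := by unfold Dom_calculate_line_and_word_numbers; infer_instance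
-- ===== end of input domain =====

-- B replaces A's single three-register state machine over txt[i] by slicing off txt[:s], counting
-- '\n' for the line number, rebuilding only the current line, and counting word-ends on adjacent
-- pairs (objective: alternative decomposition, same cost).

-- ===== PORT A =====
-- the body of A's for-loop over i in range(s), on state (line_number, word_number, in_word)
def pvStepA (st : Int × Int × Bool) (c : Char) : Int × Int × Bool :=
  if c = '\n' then (st.1 + 1, 1, false)
  else if c = ' ' then (st.1, (if st.2.2 then st.2.1 + 1 else st.2.1), false)
  else (st.1, st.2.1, true)

def calculate_line_and_word_numbers (txt : String) (s : Int) : Int × Int :=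
  let cs := txt.toList
  let st := (PySem.List.pyRange 0 s 1).foldl
    (fun st i => pvStepA st (PySem.List.pyGetD cs i ' ')) (1, 1, false)
  (st.1, st.2.1)

-- ===== PORT B =====
def calculate_line_and_word_numbers_alt (txt : String) (s : Int) : Int × Int :=
  if s ≤ 0 then (1, 1)
  else
    let pre := PySem.List.slice txt.toList none (some s)      -- txt[:s]
    let line_number : Int := 1 + (PySem.Chars.count pre ['\n'] : Int)
    -- seg: the current line so far (seg.clear() on '\n', seg.append(c) otherwise)
    let seg := pre.foldl (fun (acc : List Char) c => if c = '\n' then [] else acc ++ [c]) []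
    let word_number : Int := 1 +
      ((seg.zip (PySem.List.slice seg (some 1) none)).map
        (fun p => if p.1 ≠ ' ' ∧ p.2 = ' ' then (1 : Int) else 0)).sum
    (line_number, word_number)

-- ===== PRECONDITION & SPEC =====
-- Pre_ excludes exactly the inputs with s > len(txt), on which A's txt[i] raises IndexError.
def Pre_calculate_line_and_word_numbers (txt : String) (s : Int) : Prop :=
  s ≤ (txt.toList.length : Int)
instance (txt : String) (s : Int) : Decidable (Pre_calculate_line_and_word_numbers txt s) := by
  unfold Pre_calculate_line_and_word_numbers; infer_instance

def pvWitness_calculate_line_and_word_numbers : String × Int := ("a b\nc d", 6)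

def Spec_calculate_line_and_word_numbers (txt : String) (s : Int) (out : Int × Int) : Prop :=
  out = calculate_line_and_word_numbers_alt txt s
instance (txt : String) (s : Int) (out : Int × Int) : Decidable (Spec_calculate_line_and_word_numbers txt s out) := by
  unfold Spec_calculate_line_and_word_numbers; infer_instance

-- ===== CLAIM (what is proved, stated in full; the proofs are below) =====
def Claim_equal_calculate_line_and_word_numbers : Prop := ∀ (txt : String) (s : Int), Dom_calculate_line_and_word_numbers txt s → Pre_calculate_line_and_word_numbers txt s → Spec_calculate_line_and_word_numbers txt s (calculate_line_and_word_numbers txt s)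

-- ===== LEMMAS AND PROOFS =====

-- model pieces (proof-only): the current-line suffix, its last-char flag, and the word-end count
def pvSeg (l : List Char) : List Char :=
  l.foldl (fun (acc : List Char) c => if c = '\n' then [] else acc ++ [c]) []

def pvInw (l : List Char) : Bool :=
  match l.getLast? with
  | none => false
  | some c => decide (c ≠ ' ')

def pvWends (l : List Char) : Int :=
  ((l.zip l.tail).map (fun p => if p.1 ≠ ' ' ∧ p.2 = ' ' then (1 : Int) else 0)).sum

theorem pvSeg_append (l : List Char) (c : Char) :
    pvSeg (l ++ [c]) = if c = '\n' then [] else pvSeg l ++ [c] := by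
  simp [pvSeg, List.foldl_append]

theorem pvInw_append (l : List Char) (c : Char) :
    pvInw (l ++ [c]) = decide (c ≠ ' ') := by
  simp [pvInw]

theorem pvWends_cons_cons (a b : Char) (t : List Char) :
    pvWends (a :: b :: t) = (if a ≠ ' ' ∧ b = ' ' then (1:Int) else 0) + pvWends (b :: t) := by
  simp [pvWends]

theorem pvWends_append (l : List Char) (c : Char) :
    pvWends (l ++ [c]) = pvWends l + (if pvInw l ∧ c = ' ' then 1 else 0) := by
  induction l with
  | nil => simp [pvWends, pvInw]
  | cons a t ih =>
    cases t with
    | nil => simp [pvWends, pvInw]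
    | cons b t' =>
      have hiw : pvInw (a :: b :: t') = pvInw (b :: t') := by simp [pvInw]
      have h1 : (a :: b :: t') ++ [c] = a :: b :: (t' ++ [c]) := by simp
      rw [h1, pvWends_cons_cons, show b :: (t' ++ [c]) = (b :: t') ++ [c] from by simp, ih,
        pvWends_cons_cons a b t', hiw]
      ring

-- A's loop over a prefix list computes exactly B's three pieces
theorem pvLoop_eq (l : List Char) :
    l.foldl pvStepA (1, 1, false)
      = ((l.count '\n' : Int) + 1, 1 + pvWends (pvSeg l), pvInw (pvSeg l)) := by
  induction l using List.reverseRecOn with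
  | nil => simp [pvWends, pvSeg, pvInw]
  | append_singleton l c ih =>
    rw [List.foldl_append, ih]
    by_cases hn : c = '\n'
    · simp [pvStepA, hn, pvSeg_append, pvWends, pvInw, List.count_append]
    · by_cases hs : c = ' '
      · simp [pvStepA, hs, pvSeg_append, pvWends_append, pvInw_append, List.count_append]
        cases h : pvInw (pvSeg l)
        · simp
        · simp; ring
      · simp [pvStepA, hn, hs, pvSeg_append, pvWends_append, pvInw_append, List.count_append]

-- PySem.Chars.count on a single-character needle is List.count
theorem pvCountGo (c : Char) (l : List Char) : ∀ (fuel acc : Nat), l.length ≤ fuel →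
    PySem.Chars.count.go [c] fuel l acc = acc + l.count c := by
  induction l with
  | nil => intro fuel acc h; cases fuel <;> simp [PySem.Chars.count.go]
  | cons a t ih =>
    intro fuel acc h
    cases fuel with
    | zero => simp at h
    | succ f =>
      by_cases hac : a = c
      · have hp : [c].isPrefixOf (a :: t) = true := by simp [List.isPrefixOf, hac]
        simp only [PySem.Chars.count.go, hp, if_pos]
        rw [show List.drop [c].length (a :: t) = t from by simp, ih f (acc+1) (by simpa using h)]
        simp [hac, List.count_cons]
        omega
      · have hp : [c].isPrefixOf (a :: t) = false := by
          simp [List.isPrefixOf]; intro he; exact absurd he.symm hac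
        simp only [PySem.Chars.count.go, hp]
        rw [if_neg (by simp), ih f acc (by simpa using h)]
        have hca : ¬ c = a := fun he => hac he.symm
        simp [List.count_cons, hca]
        exact hac

theorem pvCount_single (l : List Char) (c : Char) :
    PySem.Chars.count l [c] = l.count c := by
  simp [PySem.Chars.count]
  simpa using pvCountGo c l l.length 0 (le_refl _)

theorem pvMain (txt : String) (s : Int) (hpre : s ≤ (txt.toList.length : Int)) :
    calculate_line_and_word_numbers txt s = calculate_line_and_word_numbers_alt txt s := by
  by_cases hs : s ≤ 0
  · have hr : PySem.List.pyRange 0 s 1 = [] := by simp [PySem.List.pyRange]; omega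
    simp [calculate_line_and_word_numbers, calculate_line_and_word_numbers_alt, hr, hs]
  · push_neg at hs
    have hs0 : (0:Int) ≤ s := le_of_lt hs
    set cs := txt.toList with hcs
    have hpre' : PySem.List.slice cs none (some s) = cs.take s.toNat :=
      PySem.List.slice_to cs hs0
    have hlen : (cs.take s.toNat).length = s.toNat := by
      simp; omega
    have hcong : (PySem.List.pyRange 0 s 1).foldl
        (fun st i => pvStepA st (PySem.List.pyGetD cs i ' ')) (1, 1, false)
      = (PySem.List.pyRange 0 s 1).foldl
        (fun st i => pvStepA st (PySem.List.pyGetD (cs.take s.toNat) i ' ')) (1, 1, false) := by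
      apply PySem.List.foldl_congr_mem
      intro acc x hx
      rw [PySem.List.mem_pyRange_one] at hx
      rw [PySem.List.pyGetD_of_nonneg _ _ hx.1, PySem.List.pyGetD_of_nonneg _ _ hx.1]
      congr 1
      simp [List.getD]
      rw [List.getElem?_take_of_lt (by omega)]
    have hrange : PySem.List.pyRange 0 s 1 = PySem.List.pyRange 0 (PySem.List.len (cs.take s.toNat)) 1 := by
      congr 1
      simp [PySem.List.len_eq, hlen]; omega
    have hfold := PySem.List.foldl_pyRange_pyGetD (cs.take s.toNat) ' ' pvStepA
      ((1,1,false) : Int × Int × Bool) (a := 0) (le_refl 0)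
    simp only [Int.toNat_zero, List.drop_zero] at hfold
    have hA : calculate_line_and_word_numbers txt s =
        (((cs.take s.toNat).foldl pvStepA (1,1,false)).1, ((cs.take s.toNat).foldl pvStepA (1,1,false)).2.1) := by
      show ((((PySem.List.pyRange 0 s 1).foldl
        (fun st i => pvStepA st (PySem.List.pyGetD cs i ' ')) (1, 1, false))).1, _)
        = _
      rw [hcong, hrange, hfold]
    rw [hA, pvLoop_eq]
    simp only [calculate_line_and_word_numbers_alt, if_neg (not_le.mpr hs), ← hcs, hpre',
      pvCount_single, PySem.List.slice_from_one]
    exact Prod.ext (by ring) rfl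

-- ===== VERDICT (by name: the statement is the Claim_ definition above) =====
theorem calculate_line_and_word_numbers_spec : Claim_equal_calculate_line_and_word_numbers := by
  intro txt s _ hpre
  exact pvMain txt s hpre
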